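-- pv_equiv track=rewrite | github.com/JamesHagerty1/LiveNotes-15-112-Spring-2020-Term-Project | Page.py | trimTextBlock
-- ===== SOURCE A (Python) =====
-- def trimTextBlock(textBlock):
--     blankRows = []
--     # remove blank rows
--     r = 0
--     for row in textBlock:
--         if row == [None]*len(row):
--             blankRows.append(r)
--         r += 1
--     # pop blank rows in a backwards order to avoid popping non blank rows
--     for rowPop in blankRows[::-1]:
--         textBlock.pop(rowPop)
--     if textBlock == []:
--         return textBlock
--     # remove blank cols on the edges but not those in between text
--     # remove blank cols from left end
--     blankCols = []
--     for col in range(len(textBlock[0])):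
--         allNone = True
--         # breaks iteration if the the left edge has been cleared
--         if col != 0 and col-1 not in blankCols:
--             allNone = False
--             break
--         for row in textBlock:
--             if row[col] != None:
--                 allNone = False
--         if allNone:
--             blankCols.append(col)
--     # remove blank cols from right end
--     colEnd = len(textBlock[0])-1
--     for col in range(colEnd, -1, -1):
--         allNone = True
--         # breaks iteration if the right end has been cleared
--         if col != colEnd and col+1 not in blankCols:
--             allNone = False
--             break
--         for row in textBlock:
--             if row[col] != None:
--                 allNone = False
--         if allNone:
--             blankCols.append(col)
--     # pop blank cols in a backwards order to avoid popping non blank cols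
--     blankCols = sorted(blankCols)
--     blankCols = blankCols[::-1]
--     for colPop in blankCols:
--         for row in range(len(textBlock)):
--             textBlock[row].pop(colPop)
--     return textBlock
-- ===== SOURCE B (Python) =====
-- # Single pass over the rows: keep non-blank rows while taking the minimum of the
-- # per-row leading / trailing None-run lengths, then slice each kept row once.
-- # (A mutates textBlock in place; B only reads it -- the equivalence is about the
-- # return value.)
-- def trimTextBlock(textBlock):
--     kept = []
--     L = T = None
--     for row in textBlock:
--         lead = 0
--         while lead < len(row) and row[lead] is None:
--             lead += 1
--         if lead == len(row):
--             continue  # blank row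
--         trail = 0
--         while row[len(row) - 1 - trail] is None:
--             trail += 1
--         kept.append(row)
--         L = lead if L is None else min(L, lead)
--         T = trail if T is None else min(T, trail)
--     if not kept:
--         return []
--     return [row[L:len(row) - T] for row in kept]
-- ===== Notes on version B (the rewrite author's own statement) =====
-- stated objective: alternative
-- what changed: B replaces A's index bookkeeping (collect blank row/column indices with membership tests into a growing list, then pop them one by one) with a single pass that keeps non-blank rows while taking the minimum leading/trailing None-run over the rows, slicing each kept row once; Pre_ keeps blocks whose non-blank rows are rectangular (plus ragged ones where A returns and trims no edge column) and excludes the remaining ragged inputs, where A's column scans index/pop past shorter rows (usually an IndexError) and any returned value is an accident of measuring columns against the first row's width.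
-- outside the precondition, e.g. on trimTextBlock([['a', 'b'], ['c']]): A raises IndexError, B returns [['a', 'b'], ['c']]
import Mathlib
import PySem

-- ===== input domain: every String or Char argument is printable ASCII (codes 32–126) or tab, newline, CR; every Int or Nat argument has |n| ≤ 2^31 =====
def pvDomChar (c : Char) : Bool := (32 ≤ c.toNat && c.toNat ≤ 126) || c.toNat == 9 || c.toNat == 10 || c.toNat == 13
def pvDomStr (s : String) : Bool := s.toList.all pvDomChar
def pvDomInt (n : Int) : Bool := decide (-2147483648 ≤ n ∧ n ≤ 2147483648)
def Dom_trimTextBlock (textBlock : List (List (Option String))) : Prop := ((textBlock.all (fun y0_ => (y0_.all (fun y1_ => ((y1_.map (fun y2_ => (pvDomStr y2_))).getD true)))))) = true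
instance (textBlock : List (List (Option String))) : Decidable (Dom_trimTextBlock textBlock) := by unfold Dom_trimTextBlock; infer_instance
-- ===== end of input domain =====

-- B replaces A's blank-index bookkeeping and repeated pops by one pass taking the
-- minimum leading/trailing None-run over the kept rows, then slicing each row once.
-- A mutates its argument in place; B only reads it — the equivalence is about the return value.

-- ===== PORT A =====

-- row == [None]*len(row)
def pvBlankRow (row : List (Option String)) : Bool :=
  row == List.replicate row.length none

-- the 'r' counter loop collecting indices of blank rows
def pvBlankRows : Nat → List (List (Option String)) → List Nat
  | _, [] => []
  | r, row :: rest =>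
    if pvBlankRow row then r :: pvBlankRows (r + 1) rest else pvBlankRows (r + 1) rest

-- list.pop(i); Python raises IndexError out of range (unreachable for the indices A pops)
def pvPop {α : Type} (xs : List α) (i : Nat) : List α :=
  match PySem.List.pop? xs (i : Int) with
  | some (_, rest) => rest
  | none => xs

-- row[col]; out-of-range is an IndexError in Python, excluded by Pre_
def pvCell (row : List (Option String)) (c : Nat) : Option String :=
  (PySem.List.pyGet? row (c : Int)).getD none

-- the inner 'for row in textBlock: if row[col] != None: allNone = False' loop
def pvColBlank (tb : List (List (Option String))) (c : Nat) : Bool :=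
  tb.foldl (fun allNone row => if pvCell row c ≠ none then false else allNone) true

-- left-edge column scan with its break
def pvLeftScan (tb : List (List (Option String))) : List Nat → List Nat → List Nat
  | acc, [] => acc
  | acc, c :: rest =>
    if c ≠ 0 ∧ c - 1 ∉ acc then acc
    else if pvColBlank tb c then pvLeftScan tb (acc ++ [c]) rest
    else pvLeftScan tb acc rest

-- right-edge column scan with its break
def pvRightScan (tb : List (List (Option String))) (colEnd : Nat) : List Nat → List Nat → List Nat
  | acc, [] => acc
  | acc, c :: rest =>
    if c ≠ colEnd ∧ c + 1 ∉ acc then acc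
    else if pvColBlank tb c then pvRightScan tb colEnd (acc ++ [c]) rest
    else pvRightScan tb colEnd acc rest

def trimTextBlock (textBlock : List (List (Option String))) : List (List (Option String)) :=
  let blankRows := pvBlankRows 0 textBlock
  let tb := blankRows.reverse.foldl pvPop textBlock
  if tb = [] then tb
  else
    let w := (tb.headD []).length
    let blankCols := pvLeftScan tb [] (List.range w)
    let colEnd := w - 1
    let blankCols := pvRightScan tb colEnd blankCols ((List.range (colEnd + 1)).reverse)
    let blankCols := (PySem.List.sorted blankCols (fun x => x) false).reverse
    blankCols.foldl (fun cur colPop => cur.map (fun row => pvPop row colPop)) tb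

-- ===== PORT B =====

-- length of the leading run of None in a row (the 'lead' while-loop of Source B)
def pvLead (row : List (Option String)) : Nat :=
  (row.takeWhile (fun c => c == none)).length

-- one step of Source B's single pass: skip blank rows, keep the row, fold the minima
def pvStepB (st : List (List (Option String)) × Option (Nat × Nat))
    (row : List (Option String)) : List (List (Option String)) × Option (Nat × Nat) :=
  if pvLead row = row.length then st
  else
    (st.1 ++ [row],
     match st.2 with
     | none => some (pvLead row, pvLead row.reverse)
     | some (L, T) => some (min L (pvLead row), min T (pvLead row.reverse)))

def trimTextBlock_alt (textBlock : List (List (Option String))) : List (List (Option String)) :=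
  let st := textBlock.foldl pvStepB ([], none)
  match st.2 with
  | none => []
  | some (L, T) =>
      st.1.map (fun row => PySem.List.slice row (some (L : Int)) (some ((row.length : Int) - (T : Int))))

-- ===== PRECONDITION & SPEC =====
-- Pre_ admits blocks whose non-blank rows are rectangular, and also ragged blocks on which A
-- still returns and no edge column is trimmed (first non-blank row shortest, some non-blank row
-- ends non-None and some is non-None at the last common column); it excludes the remaining
-- ragged inputs, where A's column scans index/pop past shorter rows (usually an IndexError) and
-- where A does return, measuring columns against the first row's width is an accident.
def Pre_trimTextBlock (textBlock : List (List (Option String))) : Prop :=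
  (∀ r ∈ textBlock.filter (fun r => r.any (fun c => c.isSome)),
     r.length = ((textBlock.filter (fun r => r.any (fun c => c.isSome))).headD []).length)
  ∨ ((∀ r ∈ textBlock.filter (fun r => r.any (fun c => c.isSome)),
       ((textBlock.filter (fun r => r.any (fun c => c.isSome))).headD []).length ≤ r.length)
     ∧ (∃ r ∈ textBlock.filter (fun r => r.any (fun c => c.isSome)),
         ((r.getLast?).getD none).isSome)
     ∧ (∃ r ∈ textBlock.filter (fun r => r.any (fun c => c.isSome)),
         ((r[((textBlock.filter (fun r => r.any (fun c => c.isSome))).headD []).length - 1]?).getD none).isSome))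
instance (textBlock : List (List (Option String))) : Decidable (Pre_trimTextBlock textBlock) := by
  unfold Pre_trimTextBlock; infer_instance

def pvWitness_trimTextBlock : List (List (Option String)) :=
  [[none, some "a", none], [none, none, some "b"]]

def Spec_trimTextBlock (textBlock : List (List (Option String))) (out : List (List (Option String))) : Prop := out = trimTextBlock_alt textBlock
instance (textBlock : List (List (Option String))) (out : List (List (Option String))) : Decidable (Spec_trimTextBlock textBlock out) := by unfold Spec_trimTextBlock; infer_instance

-- ===== CLAIM (what is proved, stated in full; the proofs are below) =====
def Claim_equal_trimTextBlock : Prop := ∀ (textBlock : List (List (Option String))), Dom_trimTextBlock textBlock → Pre_trimTextBlock textBlock → Spec_trimTextBlock textBlock (trimTextBlock textBlock)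

-- ===== LEMMAS AND PROOFS =====

-- ---- generic pop / eraseIdx facts ----
theorem pvPop_lt {α : Type} (xs : List α) (i : Nat) (h : i < xs.length) :
    pvPop xs i = xs.eraseIdx i := by
  simp [pvPop, PySem.List.pop?_natCast xs i h]

-- ---- blank rows: pops in reverse order = filter ----
theorem pvBlankRows_bounds :
    ∀ (tb : List (List (Option String))) (r : Nat),
      (pvBlankRows r tb).Pairwise (· < ·) ∧ ∀ i ∈ pvBlankRows r tb, r ≤ i ∧ i < r + tb.length := by
  intro tb
  induction tb with
  | nil => intro r; simp [pvBlankRows]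
  | cons row rest ih =>
    intro r
    obtain ⟨ihp, ihb⟩ := ih (r + 1)
    by_cases h : pvBlankRow row = true
    · constructor
      · simp only [pvBlankRows, h, if_true]
        refine List.Pairwise.cons ?_ ihp
        intro i hi
        have := (ihb i hi).1
        omega
      · intro i hi
        simp only [pvBlankRows, h, if_true, List.mem_cons] at hi
        rcases hi with rfl | hi
        · simp only [List.length_cons]; omega
        · have := ihb i hi
          simp only [List.length_cons]; omega
    · rw [Bool.not_eq_true] at h
      constructor
      · simpa [pvBlankRows, h] using ihp
      · intro i hi
        simp only [pvBlankRows, h] at hi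
        have := ihb i (by simpa using hi)
        simp only [List.length_cons]; omega

theorem pvBlankRows_shift :
    ∀ (tb : List (List (Option String))) (r : Nat),
      pvBlankRows r tb = (pvBlankRows 0 tb).map (· + r) := by
  intro tb
  induction tb with
  | nil => intro r; simp [pvBlankRows]
  | cons row rest ih =>
    intro r
    by_cases h : pvBlankRow row = true
    · simp only [pvBlankRows, h, if_true, ih (r + 1), ih 1]
      simp only [List.map_cons, List.map_map]
      congr 1
      · omega
      · apply List.map_congr_left
        intro x _
        simp only [Function.comp]
        omega
    · rw [Bool.not_eq_true] at h
      simp only [pvBlankRows, h, Bool.false_eq_true, if_false, ih (r + 1), ih 1]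
      simp only [List.map_map]
      apply List.map_congr_left
      intro x _
      simp only [Function.comp]
      omega

theorem pop_map_succ {α : Type} :
    ∀ (l : List Nat) (x : α) (xs : List α),
      l.Pairwise (· > ·) → (∀ i ∈ l, i < xs.length) →
      ((l.map (· + 1)).foldl pvPop (x :: xs)) = x :: l.foldl pvPop xs := by
  intro l
  induction l with
  | nil => intro x xs _ _; simp
  | cons i t ih =>
    intro x xs hp hb
    have hi : i < xs.length := hb i (List.mem_cons_self ..)
    have h1 : pvPop (x :: xs) (i + 1) = x :: pvPop xs i := by
      rw [pvPop_lt _ _ (by simp; omega), pvPop_lt _ _ hi]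
      simp [List.eraseIdx_cons_succ]
    simp only [List.map_cons, List.foldl_cons, h1]
    apply ih x (pvPop xs i) (List.Pairwise.sublist (List.sublist_cons_self i t) hp)
    intro j hj
    have hji : j < i := (List.pairwise_cons.mp hp).1 j hj
    rw [pvPop_lt _ _ hi, List.length_eraseIdx_of_lt hi]
    omega

theorem rows_eq :
    ∀ tb : List (List (Option String)),
      (pvBlankRows 0 tb).reverse.foldl pvPop tb = tb.filter (fun r => !pvBlankRow r) := by
  intro tb
  induction tb with
  | nil => simp [pvBlankRows]
  | cons row rest ih =>
    have hshift : pvBlankRows 1 rest = (pvBlankRows 0 rest).map (· + 1) := pvBlankRows_shift rest 1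
    have hpair : ((pvBlankRows 0 rest).reverse).Pairwise (· > ·) := by
      rw [List.pairwise_reverse]
      exact (pvBlankRows_bounds rest 0).1
    have hbnd : ∀ i ∈ (pvBlankRows 0 rest).reverse, i < rest.length := by
      intro i hi
      have := ((pvBlankRows_bounds rest 0).2 i (List.mem_reverse.mp hi)).2
      omega
    by_cases h : pvBlankRow row = true
    · simp only [pvBlankRows, h, if_true, List.reverse_cons, hshift, ← List.map_reverse]
      rw [List.foldl_append, pop_map_succ _ row rest hpair hbnd, ih]
      rw [List.filter_cons]
      simp only [h, Bool.not_true, Bool.false_eq_true, if_false]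
      simp only [List.foldl_cons, List.foldl_nil]
      rw [pvPop_lt _ _ (by simp)]
      simp
    · rw [Bool.not_eq_true] at h
      simp only [pvBlankRows, h, Bool.false_eq_true, if_false, hshift, ← List.map_reverse]
      rw [pop_map_succ _ row rest hpair hbnd, ih]
      rw [List.filter_cons]
      simp [h]

-- ---- pvLead facts ----
theorem lead_le_length (r : List (Option String)) : pvLead r ≤ r.length := by
  induction r with
  | nil => simp [pvLead]
  | cons a t ih =>
    simp only [pvLead, List.takeWhile_cons] at *
    cases h : (a == none) with
    | true => simpa using ih
    | false => simp

theorem lead_get (r : List (Option String)) : ∀ j < pvLead r, r[j]? = some none := by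
  induction r with
  | nil => simp [pvLead]
  | cons a t ih =>
    intro j hj
    simp only [pvLead, List.takeWhile_cons] at hj
    cases h : (a == none) with
    | false => simp [h] at hj
    | true =>
      have ha : a = none := by simpa [beq_iff_eq] using h
      cases j with
      | zero => simp [ha]
      | succ j =>
        simp only [h, if_true, List.length_cons] at hj
        refine (by simp : (a :: t)[j+1]? = t[j]?).trans (ih j ?_)
        simp only [pvLead]
        omega

theorem lead_stop (r : List (Option String)) (h : pvLead r < r.length) :
    ∃ s, r[pvLead r]? = some (some s) := by
  induction r with
  | nil => simp [pvLead] at h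
  | cons a t ih =>
    by_cases ha : a = none
    · have hl : pvLead (a :: t) = pvLead t + 1 := by simp [pvLead, List.takeWhile_cons, ha]
      rw [hl]
      have ht : pvLead t < t.length := by
        rw [hl] at h; simpa using h
      simpa using ih ht
    · have hl : pvLead (a :: t) = 0 := by simp [pvLead, ha]
      rw [hl]
      cases a with
      | none => exact absurd rfl ha
      | some s => exact ⟨s, by simp⟩

theorem blank_eq_lead (r : List (Option String)) :
    pvBlankRow r = decide (pvLead r = r.length) := by
  induction r with
  | nil => simp [pvBlankRow, pvLead]
  | cons a t ih =>
    by_cases ha : a = none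
    · have hl : pvLead (a :: t) = pvLead t + 1 := by simp [pvLead, List.takeWhile_cons, ha]
      have hb : pvBlankRow (a :: t) = pvBlankRow t := by
        simp [pvBlankRow, List.replicate_succ, ha]
      rw [hb, hl, ih]
      simp
    · have hl : pvLead (a :: t) = 0 := by simp [pvLead, List.takeWhile_cons, ha]
      have hb : pvBlankRow (a :: t) = false := by
        simp [pvBlankRow, List.replicate_succ, ha]
      rw [hb, hl]
      simp

theorem blank_reverse (r : List (Option String)) : pvBlankRow r.reverse = pvBlankRow r := by
  simp only [pvBlankRow, List.length_reverse]
  rw [Bool.eq_iff_iff]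
  simp only [beq_iff_eq]
  constructor
  · intro h
    have := congrArg List.reverse h
    simpa [List.reverse_replicate] using this
  · intro h
    rw [h]
    simp

-- ---- column blankness ----
theorem colBlank_foldl_aux (tb : List (List (Option String))) (c : Nat) :
    ∀ b : Bool,
      tb.foldl (fun allNone row => if pvCell row c ≠ none then false else allNone) b
      = (b && tb.all (fun row => pvCell row c == none)) := by
  induction tb with
  | nil => simp
  | cons row rest ih =>
    intro b
    have hstep : (if pvCell row c ≠ none then false else b) = (b && (pvCell row c == none)) := by
      cases hc2 : pvCell row c <;> cases b <;> simp [hc2]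
    simp only [List.foldl_cons, hstep, ih, List.all_cons]
    cases b <;> cases h : (pvCell row c == none) <;> simp [h]

theorem colBlank_eq_all (tb : List (List (Option String))) (c : Nat) :
    pvColBlank tb c = tb.all (fun row => pvCell row c == none) := by
  unfold pvColBlank
  rw [colBlank_foldl_aux tb c true, Bool.true_and]

theorem pvCell_eq (row : List (Option String)) (c : Nat) :
    pvCell row c = (row[c]?).getD none := by
  simp [pvCell, PySem.List.pyGet?_natCast]

theorem colBlank_iff (tb : List (List (Option String))) (c : Nat)
    (h : ∀ row ∈ tb, c < row.length) :
    pvColBlank tb c = true ↔ ∀ row ∈ tb, row[c]? = some none := by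
  rw [colBlank_eq_all, List.all_eq_true]
  constructor
  · intro hall row hr
    have hc := h row hr
    have := hall row hr
    rw [pvCell_eq, List.getElem?_eq_getElem hc] at this
    simp only [Option.getD_some, beq_iff_eq] at this
    rw [List.getElem?_eq_getElem hc, this]
  · intro hall row hr
    have := hall row hr
    rw [pvCell_eq, this]
    simp

theorem colBlank_reverse (tb : List (List (Option String))) (w c : Nat)
    (hlen : ∀ row ∈ tb, row.length = w) (hc : c < w) :
    pvColBlank (tb.map List.reverse) c = pvColBlank tb (w - 1 - c) := by
  rw [colBlank_eq_all, colBlank_eq_all, List.all_map]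
  rw [Bool.eq_iff_iff, List.all_eq_true, List.all_eq_true]
  have key : ∀ row ∈ tb, pvCell row.reverse c = pvCell row (w - 1 - c) := by
    intro row hr
    have hlenr := hlen row hr
    rw [pvCell_eq, pvCell_eq]
    rw [List.getElem?_reverse (by rw [hlenr]; exact hc)]
    rw [hlenr]
  constructor
  · intro hall row hr
    have := hall row hr
    simp only [Function.comp] at this
    rw [← key row hr]
    exact this
  · intro hall row hr
    simp only [Function.comp]
    rw [key row hr]
    exact hall row hr

-- ---- the two scans ----
theorem left_stuck (tb : List (List (Option String))) :
    ∀ (n c : Nat), pvLeftScan tb (List.range c) (List.range' (c + 1) n) = List.range c := by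
  intro n c
  cases n with
  | zero => simp [pvLeftScan]
  | succ n =>
    rw [List.range'_succ]
    show pvLeftScan tb (List.range c) ((c + 1) :: List.range' (c + 2) n) = List.range c
    rw [pvLeftScan]
    rw [if_pos]
    constructor
    · omega
    · simp

theorem left_scan_spec (tb : List (List (Option String))) :
    ∀ (n c m : Nat), c ≤ m → m ≤ c + n →
      (∀ j, c ≤ j → j < m → pvColBlank tb j = true) →
      (m = c + n ∨ pvColBlank tb m = false) →
      pvLeftScan tb (List.range c) (List.range' c n) = List.range m := by
  intro n
  induction n with
  | zero =>
    intro c m h1 h2 _ _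
    have : c = m := by omega
    subst this
    simp [pvLeftScan]
  | succ n ih =>
    intro c m h1 h2 hb hs
    rw [List.range'_succ, pvLeftScan]
    rw [if_neg (by
      rintro ⟨hc0, hmem⟩
      exact hmem (by simp [List.mem_range]; omega))]
    by_cases hcm : c < m
    · rw [if_pos (hb c (le_refl c) hcm)]
      rw [show List.range c ++ [c] = List.range (c + 1) from (List.range_succ).symm]
      apply ih (c + 1) m hcm (by omega) (fun j hj hjm => hb j (by omega) hjm)
      rcases hs with h | h
      · left; omega
      · right; exact h
    · have hcme : c = m := by omega
      subst hcme
      have hbl : pvColBlank tb c = false := by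
        rcases hs with h | h
        · omega
        · exact h
      rw [hbl]
      simp only [Bool.false_eq_true, if_false]
      exact left_stuck tb n c

theorem right_scan_spec (tb : List (List (Option String))) (w L b : Nat)
    (hw : 1 ≤ w) (hb1 : 1 ≤ b) (hbw : b ≤ w) (hLb : L < b)
    (hblank : ∀ j, b ≤ j → j < w → pvColBlank tb j = true)
    (hstop : pvColBlank tb (b - 1) = false) :
    ∀ c, b - 1 ≤ c → c < w →
      pvRightScan tb (w - 1) (List.range L ++ (List.range' (c + 1) (w - 1 - c)).reverse)
        ((List.range (c + 1)).reverse)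
      = List.range L ++ (List.range' b (w - b)).reverse := by
  intro c
  induction c using Nat.strong_induction_on with
  | _ c ih =>
    intro hbc hcw
    rw [show (List.range (c + 1)).reverse = c :: (List.range c).reverse by
      rw [List.range_succ, List.reverse_append]; simp]
    rw [pvRightScan]
    rw [if_neg (by
      rintro ⟨hcE, hmem⟩
      apply hmem
      have hclt : c < w - 1 := by omega
      rw [List.mem_append, List.mem_reverse]
      right
      rw [List.mem_range']
      exact ⟨0, by omega, by omega⟩)]
    by_cases hc : b ≤ c
    · rw [if_pos (hblank c hc hcw)]
      have hacc : (List.range L ++ (List.range' (c + 1) (w - 1 - c)).reverse) ++ [c]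
          = List.range L ++ (List.range' c (w - c)).reverse := by
        rw [List.append_assoc]
        congr 1
        rw [show w - c = (w - 1 - c) + 1 by omega, List.range'_succ, List.reverse_cons]
      rw [hacc]
      obtain ⟨c', rfl⟩ : ∃ c', c = c' + 1 := ⟨c - 1, by omega⟩
      rw [show w - (c' + 1) = w - 1 - c' by omega]
      exact ih c' (by omega) (by omega) (by omega)
    · -- c = b - 1 : the stopping column
      have hcb : c = b - 1 := by omega
      rw [if_neg (by rw [hcb, hstop]; simp)]
      have hfin : List.range L ++ (List.range' (c + 1) (w - 1 - c)).reverse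
          = List.range L ++ (List.range' b (w - b)).reverse := by
        rw [show c + 1 = b by omega, show w - 1 - c = w - b by omega]
      cases c with
      | zero => simpa [pvRightScan] using hfin
      | succ c' =>
        rw [show (List.range (c' + 1)).reverse = c' :: (List.range c').reverse by
          rw [List.range_succ, List.reverse_append]; simp]
        rw [pvRightScan]
        rw [if_pos ?_]
        · exact hfin
        · constructor
          · omega
          · intro hmem
            rw [List.mem_append, List.mem_reverse] at hmem
            rcases hmem with hm | hm
            · rw [List.mem_range] at hm; omega
            · rw [List.mem_range'] at hm; omega

-- ---- popping the collected column indices ----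
theorem foldl_map_pop :
    ∀ (cols : List Nat) (tb : List (List (Option String))),
      cols.foldl (fun cur colPop => cur.map (fun row => pvPop row colPop)) tb
      = tb.map (fun row => cols.foldl pvPop row) := by
  intro cols
  induction cols with
  | nil => intro tb; simp
  | cons c t ih =>
    intro tb
    simp only [List.foldl_cons, ih, List.map_map]
    rfl

theorem pop_desc_suffix {α : Type} :
    ∀ (K : Nat) (row : List α), K ≤ row.length →
      ((List.range' (row.length - K) K).reverse).foldl pvPop row = row.take (row.length - K) := by
  intro K
  induction K with
  | zero => intro row _; simp
  | succ K ih =>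
    intro row hK
    have hsplit : List.range' (row.length - (K + 1)) (K + 1)
        = List.range' (row.length - (K + 1)) K ++ [row.length - 1] := by
      rw [List.range'_concat]
      congr 2
      omega
    rw [hsplit, List.reverse_append, List.reverse_singleton]
    simp only [List.singleton_append, List.foldl_cons]
    have hlen : 1 ≤ row.length := by omega
    have hpop : pvPop row (row.length - 1) = row.take (row.length - 1) := by
      rw [pvPop_lt _ _ (by omega), List.eraseIdx_eq_take_drop_succ]
      rw [show row.length - 1 + 1 = row.length by omega, List.drop_length, List.append_nil]
    rw [hpop]
    have htk : (row.take (row.length - 1)).length = row.length - 1 := by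
      simp
    have := ih (row.take (row.length - 1)) (by rw [htk]; omega)
    rw [htk] at this
    rw [show row.length - 1 - K = row.length - (K + 1) by omega] at this
    rw [this, List.take_take]
    congr 1
    omega

theorem pop_desc_prefix {α : Type} :
    ∀ (L : Nat) (row : List α), L ≤ row.length →
      ((List.range L).reverse).foldl pvPop row = row.drop L := by
  intro L
  induction L with
  | zero => intro row _; simp
  | succ L ih =>
    intro row hL
    rw [show (List.range (L + 1)).reverse = L :: (List.range L).reverse by
      rw [List.range_succ, List.reverse_append]; simp]
    simp only [List.foldl_cons]
    have hpop : pvPop row L = row.take L ++ row.drop (L + 1) := by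
      rw [pvPop_lt _ _ (by omega), List.eraseIdx_eq_take_drop_succ]
    rw [hpop]
    have hlen : (row.take L ++ row.drop (L + 1)).length = row.length - 1 := by
      simp; omega
    rw [ih _ (by omega : L ≤ (row.take L ++ row.drop (L + 1)).length)]
    exact List.drop_left' (by simp; omega)

-- ---- B's fold ----
theorem foldB_fst :
    ∀ (tb : List (List (Option String))) (k : List (List (Option String))) (o : Option (Nat × Nat)),
      (tb.foldl pvStepB (k, o)).1 = k ++ tb.filter (fun r => !decide (pvLead r = r.length)) := by
  intro tb
  induction tb with
  | nil => intro k o; simp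
  | cons row rest ih =>
    intro k o
    by_cases h : pvLead row = row.length
    · simp only [List.foldl_cons, pvStepB, if_pos h, ih, List.filter_cons]
      simp [h]
    · simp only [List.foldl_cons, pvStepB, if_neg h, ih, List.filter_cons]
      simp [h]

def pvMinPair (p : Nat × Nat) (row : List (Option String)) : Nat × Nat :=
  (min p.1 (pvLead row), min p.2 (pvLead row.reverse))

theorem foldB_snd_some :
    ∀ (tb : List (List (Option String))) (k : List (List (Option String))) (p : Nat × Nat),
      (tb.foldl pvStepB (k, some p)).2
      = some ((tb.filter (fun r => !decide (pvLead r = r.length))).foldl pvMinPair p) := by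
  intro tb
  induction tb with
  | nil => intro k p; simp
  | cons row rest ih =>
    intro k p
    by_cases h : pvLead row = row.length
    · simp only [List.foldl_cons, pvStepB, if_pos h, ih, List.filter_cons]
      simp [h]
    · simp only [List.foldl_cons, pvStepB, if_neg h, ih, List.filter_cons]
      simp only [h, decide_false, Bool.not_false]
      rfl

theorem foldB_snd_none :
    ∀ (tb : List (List (Option String))) (k : List (List (Option String))),
      (tb.foldl pvStepB (k, none)).2
      = (match tb.filter (fun r => !decide (pvLead r = r.length)) with
         | [] => none
         | r :: rs => some (rs.foldl pvMinPair (pvLead r, pvLead r.reverse))) := by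
  intro tb
  induction tb with
  | nil => intro k; simp
  | cons row rest ih =>
    intro k
    by_cases h : pvLead row = row.length
    · simp only [List.foldl_cons, pvStepB, if_pos h, ih, List.filter_cons]
      simp [h]
    · simp only [List.foldl_cons, pvStepB, if_neg h, List.filter_cons]
      simp only [h, decide_false, Bool.not_false]
      rw [foldB_snd_some]
      rfl

theorem minPair_fold (rs : List (List (Option String))) (a b : Nat) :
    rs.foldl pvMinPair (a, b)
    = (rs.foldl (fun m r => min m (pvLead r)) a,
       rs.foldl (fun m r => min m (pvLead r.reverse)) b) := by
  induction rs generalizing a b with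
  | nil => simp
  | cons r t ih => simp only [List.foldl_cons, pvMinPair, ih]

-- ---- foldl-min facts ----
theorem foldl_min_le_init {α : Type} (f : α → Nat) :
    ∀ (l : List α) (a : Nat), l.foldl (fun m r => min m (f r)) a ≤ a := by
  intro l
  induction l with
  | nil => intro a; simp
  | cons r t ih =>
    intro a
    simp only [List.foldl_cons]
    exact le_trans (ih (min a (f r))) (by omega)

theorem foldl_min_le_mem {α : Type} (f : α → Nat) :
    ∀ (l : List α) (a : Nat) (r : α), r ∈ l → l.foldl (fun m r => min m (f r)) a ≤ f r := by
  intro l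
  induction l with
  | nil => intro a r hr; simp at hr
  | cons x t ih =>
    intro a r hr
    rcases List.mem_cons.mp hr with rfl | hr
    · simp only [List.foldl_cons]
      exact le_trans (foldl_min_le_init f t (min a (f r))) (by omega)
    · simp only [List.foldl_cons]
      exact ih (min a (f x)) r hr

theorem foldl_min_cases {α : Type} (f : α → Nat) :
    ∀ (l : List α) (a : Nat),
      l.foldl (fun m r => min m (f r)) a = a ∨ ∃ r ∈ l, l.foldl (fun m r => min m (f r)) a = f r := by
  intro l
  induction l with
  | nil => intro a; left; rfl
  | cons x t ih =>
    intro a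
    simp only [List.foldl_cons]
    rcases ih (min a (f x)) with h | ⟨r, hr, h⟩
    · by_cases hax : a ≤ f x
      · left; rw [h]; omega
      · right; exact ⟨x, List.mem_cons_self .., by rw [h]; omega⟩
    · right; exact ⟨r, List.mem_cons_of_mem _ hr, h⟩

-- ---- the core: the min of the leads is the number of blank edge columns ----
theorem core_min (r0 : List (Option String)) (rs : List (List (Option String))) (w : Nat)
    (h0 : r0.length = w) (hge : ∀ r ∈ r0 :: rs, w ≤ r.length)
    (hnb : ∀ r ∈ r0 :: rs, pvBlankRow r = false) :
    rs.foldl (fun m r => min m (pvLead r)) (pvLead r0) < w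
    ∧ (∀ j, j < rs.foldl (fun m r => min m (pvLead r)) (pvLead r0) → pvColBlank (r0 :: rs) j = true)
    ∧ pvColBlank (r0 :: rs) (rs.foldl (fun m r => min m (pvLead r)) (pvLead r0)) = false := by
  set Lm := rs.foldl (fun m r => min m (pvLead r)) (pvLead r0) with hLm
  have hle : ∀ r ∈ r0 :: rs, Lm ≤ pvLead r := by
    intro r hr
    rcases List.mem_cons.mp hr with rfl | hr
    · exact foldl_min_le_init pvLead rs (pvLead r)
    · exact foldl_min_le_mem pvLead rs (pvLead r0) r hr
  have hltlen : ∀ r ∈ r0 :: rs, pvLead r < r.length := by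
    intro r hr
    have h1 := hnb r hr
    rw [blank_eq_lead] at h1
    have h2 : ¬ (pvLead r = r.length) := by simpa using h1
    have := lead_le_length r
    omega
  have hex : ∃ r ∈ r0 :: rs, pvLead r = Lm := by
    rcases foldl_min_cases pvLead rs (pvLead r0) with h | ⟨r, hr, h⟩
    · exact ⟨r0, List.mem_cons_self .., h.symm⟩
    · exact ⟨r, List.mem_cons_of_mem _ hr, h.symm⟩
  obtain ⟨rstar, hrstar, hreq⟩ := hex
  have hLmw : Lm < w := by
    have h1 := hle r0 (List.mem_cons_self ..)
    have h2 := hltlen r0 (List.mem_cons_self ..)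
    omega
  refine ⟨hLmw, ?_, ?_⟩
  · intro j hj
    rw [colBlank_iff _ _ (fun row hrow => by have := hge row hrow; omega)]
    intro row hrow
    exact lead_get row j (by have := hle row hrow; omega)
  · cases hcb : pvColBlank (r0 :: rs) Lm with
    | false => rfl
    | true =>
      exfalso
      have hall := (colBlank_iff (r0 :: rs) Lm
        (fun row hrow => by have := hge row hrow; omega)).mp hcb
      have hlt : Lm < rstar.length := by
        have := hge rstar hrstar; omega
      obtain ⟨str, hs⟩ := by
        have := lead_stop rstar (by rw [hreq]; exact hlt)
        rw [hreq] at this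
        exact this
      have hnone := hall rstar hrstar
      rw [hnone] at hs
      simp at hs

-- the nonempty case: A's column scans + pops equal B's single slice, row by row
theorem nonempty_case (r0 : List (Option String)) (rs : List (List (Option String))) (w0 : Nat)
    (hlen : ∀ r ∈ r0 :: rs, r.length = w0) (hnb : ∀ r ∈ r0 :: rs, pvBlankRow r = false) :
    ((PySem.List.sorted
        (pvRightScan (r0 :: rs) (((r0 :: rs).headD []).length - 1)
          (pvLeftScan (r0 :: rs) [] (List.range ((r0 :: rs).headD []).length))
          ((List.range ((((r0 :: rs).headD []).length - 1) + 1)).reverse))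
        (fun x => x) false).reverse).foldl
      (fun cur colPop => cur.map (fun row => pvPop row colPop)) (r0 :: rs)
    = (r0 :: rs).map (fun row => PySem.List.slice row
        (some ((rs.foldl (fun m r => min m (pvLead r)) (pvLead r0) : Nat) : Int))
        (some ((row.length : Int) - (rs.foldl (fun m r => min m (pvLead r.reverse)) (pvLead r0.reverse) : Nat)))) := by
  have hhead : ((r0 :: rs).headD []).length = w0 := hlen r0 (List.mem_cons_self ..)
  rw [hhead]
  set tb1 := r0 :: rs with htb1
  set Lm := rs.foldl (fun m r => min m (pvLead r)) (pvLead r0) with hLmdef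
  set Tm := rs.foldl (fun m r => min m (pvLead r.reverse)) (pvLead r0.reverse) with hTmdef
  obtain ⟨hLmw, hLb, hLs⟩ := core_min r0 rs w0 (hlen r0 (List.mem_cons_self ..))
    (fun r hr => le_of_eq (hlen r hr).symm) hnb
  have hlenR : ∀ r ∈ r0.reverse :: rs.map List.reverse, r.length = w0 := by
    intro r hr
    rcases List.mem_cons.mp hr with rfl | hr
    · rw [List.length_reverse]; exact hlen r0 (List.mem_cons_self ..)
    · obtain ⟨r', hr', rfl⟩ := List.mem_map.mp hr
      rw [List.length_reverse]; exact hlen r' (List.mem_cons_of_mem _ hr')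
  have hnbR : ∀ r ∈ r0.reverse :: rs.map List.reverse, pvBlankRow r = false := by
    intro r hr
    rcases List.mem_cons.mp hr with rfl | hr
    · rw [blank_reverse]; exact hnb r0 (List.mem_cons_self ..)
    · obtain ⟨r', hr', rfl⟩ := List.mem_map.mp hr
      rw [blank_reverse]; exact hnb r' (List.mem_cons_of_mem _ hr')
  obtain ⟨hTmw', hTb', hTs'⟩ := core_min r0.reverse (rs.map List.reverse) w0
    (hlenR r0.reverse (List.mem_cons_self ..)) (fun r hr => le_of_eq (hlenR r hr).symm) hnbR
  have hfm : (rs.map List.reverse).foldl (fun m r => min m (pvLead r)) (pvLead r0.reverse) = Tm := by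
    rw [List.foldl_map]
  rw [hfm] at hTmw' hTb' hTs'
  have hrevcons : (r0.reverse :: rs.map List.reverse) = tb1.map List.reverse := by simp [htb1]
  rw [hrevcons] at hTb' hTs'
  have hTb : ∀ j, j < Tm → pvColBlank tb1 (w0 - 1 - j) = true := by
    intro j hj
    rw [← colBlank_reverse tb1 w0 j (fun r hr => hlen r hr) (by omega)]
    exact hTb' j hj
  have hTs : pvColBlank tb1 (w0 - 1 - Tm) = false := by
    rw [← colBlank_reverse tb1 w0 Tm (fun r hr => hlen r hr) hTmw']
    exact hTs'
  have hw1 : 1 ≤ w0 := by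
    have h1 := hnb r0 (List.mem_cons_self ..)
    have h2 := hlen r0 (List.mem_cons_self ..)
    rcases Nat.eq_zero_or_pos w0 with h | h
    · exfalso
      rw [h] at h2
      have : r0 = [] := List.eq_nil_of_length_eq_zero h2
      rw [this] at h1
      simp [pvBlankRow] at h1
    · exact h
  have hLT : Lm + Tm < w0 := by
    by_contra hcon
    have hj : w0 - 1 - Lm < Tm := by omega
    have := hTb (w0 - 1 - Lm) hj
    rw [show w0 - 1 - (w0 - 1 - Lm) = Lm by omega] at this
    rw [this] at hLs
    exact Bool.noConfusion hLs
  set b := w0 - Tm with hbdef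
  have hleft : pvLeftScan tb1 [] (List.range w0) = List.range Lm := by
    have h0 : ([] : List Nat) = List.range 0 := by simp
    have hr : List.range w0 = List.range' 0 w0 := List.range_eq_range'
    rw [h0, hr]
    exact left_scan_spec tb1 w0 0 Lm (by omega) (by omega)
      (fun j _ hjm => hLb j hjm) (Or.inr hLs)
  have hright : pvRightScan tb1 (w0 - 1) (List.range Lm) ((List.range ((w0 - 1) + 1)).reverse)
      = List.range Lm ++ (List.range' b (w0 - b)).reverse := by
    have hinit : List.range Lm = List.range Lm ++ (List.range' ((w0 - 1) + 1) (w0 - 1 - (w0 - 1))).reverse := by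
      simp
    conv_lhs => rw [hinit]
    exact right_scan_spec tb1 w0 Lm b hw1 (by omega) (by omega) (by omega)
      (fun j hbj hjw => by
        have := hTb (w0 - 1 - j) (by omega)
        rw [show w0 - 1 - (w0 - 1 - j) = j by omega] at this
        exact this)
      (by rw [show b - 1 = w0 - 1 - Tm by omega]; exact hTs)
      (w0 - 1) (by omega) (by omega)
  rw [hleft, hright]
  have hsorted : PySem.List.sorted (List.range Lm ++ (List.range' b (w0 - b)).reverse) (fun x => x) false
      = List.range Lm ++ List.range' b (w0 - b) := by
    apply PySem.List.sorted_eq_of_perm_of_pairwise_lt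
    · exact List.Perm.append_left _ (List.reverse_perm _).symm
    · rw [List.pairwise_append]
      refine ⟨List.pairwise_lt_range, List.pairwise_lt_range', ?_⟩
      intro x hx y hy
      rw [List.mem_range] at hx
      rw [List.mem_range'] at hy
      omega
  rw [hsorted, List.reverse_append, foldl_map_pop]
  apply List.map_congr_left
  intro row hrow
  have hrl : row.length = w0 := hlen row hrow
  rw [List.foldl_append]
  have hsfx : ((List.range' b (w0 - b)).reverse).foldl pvPop row = row.take b := by
    have hps := pop_desc_suffix (w0 - b) row (by omega)
    rw [hrl] at hps
    rw [show w0 - (w0 - b) = b by omega] at hps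
    exact hps
  rw [hsfx]
  have hpfx : ((List.range Lm).reverse).foldl pvPop (row.take b) = (row.take b).drop Lm := by
    apply pop_desc_prefix
    rw [List.length_take, hrl]
    omega
  rw [hpfx]
  have hcast : ((row.length : Int) - (Tm : Int)) = ((b : Nat) : Int) := by
    rw [hrl]; omega
  rw [hcast, PySem.List.slice_natCast, List.drop_take]

-- the ragged agreeing case: no edge column is popped on the right, and B's trail minimum is 0
theorem any_isSome_eq_not_blank (r : List (Option String)) :
    (r.any (fun c => c.isSome)) = !pvBlankRow r := by
  induction r with
  | nil => simp [pvBlankRow]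
  | cons a t ih =>
    by_cases ha : a = none
    · have hb : pvBlankRow (a :: t) = pvBlankRow t := by
        simp [pvBlankRow, List.replicate_succ, ha]
      subst ha
      rw [hb, ← ih]
      simp
    · have hb : pvBlankRow (a :: t) = false := by
        simp [pvBlankRow, List.replicate_succ, ha]
      cases a with
      | none => exact absurd rfl ha
      | some x => simp [hb]

theorem nonempty_ragged (r0 : List (Option String)) (rs : List (List (Option String)))
    (hnb : ∀ r ∈ r0 :: rs, pvBlankRow r = false)
    (hge : ∀ r ∈ r0 :: rs, r0.length ≤ r.length)
    (hlast : ∃ r ∈ r0 :: rs, ((r.getLast?).getD none).isSome)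
    (hwcol : ∃ r ∈ r0 :: rs, ((r[r0.length - 1]?).getD none).isSome) :
    ((PySem.List.sorted
        (pvRightScan (r0 :: rs) (((r0 :: rs).headD []).length - 1)
          (pvLeftScan (r0 :: rs) [] (List.range ((r0 :: rs).headD []).length))
          ((List.range ((((r0 :: rs).headD []).length - 1) + 1)).reverse))
        (fun x => x) false).reverse).foldl
      (fun cur colPop => cur.map (fun row => pvPop row colPop)) (r0 :: rs)
    = (r0 :: rs).map (fun row => PySem.List.slice row
        (some ((rs.foldl (fun m r => min m (pvLead r)) (pvLead r0) : Nat) : Int))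
        (some ((row.length : Int) - (rs.foldl (fun m r => min m (pvLead r.reverse)) (pvLead r0.reverse) : Nat)))) := by
  have hhead : ((r0 :: rs).headD []).length = r0.length := rfl
  rw [hhead]
  set tb1 := r0 :: rs with htb1
  set w0 := r0.length with hw0def
  set Lm := rs.foldl (fun m r => min m (pvLead r)) (pvLead r0) with hLmdef
  set Tm := rs.foldl (fun m r => min m (pvLead r.reverse)) (pvLead r0.reverse) with hTmdef
  obtain ⟨hLmw, hLb, hLs⟩ := core_min r0 rs w0 rfl hge hnb
  have hw1 : 1 ≤ w0 := by
    have h1 := hnb r0 (List.mem_cons_self ..)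
    cases r0 with
    | nil => simp [pvBlankRow] at h1
    | cons a t => simp [hw0def]
  -- B's trail minimum is 0
  have hTm0 : Tm = 0 := by
    obtain ⟨rt, hrt, hl⟩ := hlast
    have hgl : ∃ s, rt.getLast? = some (some s) := by
      cases hg : rt.getLast? with
      | none => rw [hg] at hl; simp at hl
      | some x =>
        cases x with
        | none => rw [hg] at hl; simp at hl
        | some s => exact ⟨s, rfl⟩
    obtain ⟨st, hst⟩ := hgl
    have hhr : rt.reverse.head? = some (some st) := by
      rw [List.head?_reverse]; exact hst
    have htrail : pvLead rt.reverse = 0 := by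
      cases hrv : rt.reverse with
      | nil => rw [hrv] at hhr; simp at hhr
      | cons b t' =>
        rw [hrv] at hhr
        simp only [List.head?_cons, Option.some.injEq] at hhr
        simp [pvLead, List.takeWhile_cons, hhr]
    have hle0 : Tm ≤ 0 := by
      rcases List.mem_cons.mp hrt with rfl | hrt'
      · rw [← htrail]; exact foldl_min_le_init _ rs (pvLead rt.reverse)
      · rw [← htrail]; exact foldl_min_le_mem _ rs (pvLead r0.reverse) rt hrt'
    omega
  -- the last common column is not blank
  have hstop : pvColBlank tb1 (w0 - 1) = false := by
    obtain ⟨rw_, hrw, hc⟩ := hwcol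
    have hcs : ∃ s, rw_[w0 - 1]? = some (some s) := by
      cases hg : rw_[w0 - 1]? with
      | none => rw [hg] at hc; simp at hc
      | some x =>
        cases x with
        | none => rw [hg] at hc; simp at hc
        | some s => exact ⟨s, rfl⟩
    obtain ⟨s, hs⟩ := hcs
    cases hcb : pvColBlank tb1 (w0 - 1) with
    | false => rfl
    | true =>
      exfalso
      have hall := (colBlank_iff tb1 (w0 - 1)
        (fun row hrow => by have := hge row hrow; omega)).mp hcb
      have := hall rw_ hrw
      rw [this] at hs
      simp at hs
  -- left scan = range Lm
  have hleft : pvLeftScan tb1 [] (List.range w0) = List.range Lm := by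
    have h0 : ([] : List Nat) = List.range 0 := by simp
    have hr : List.range w0 = List.range' 0 w0 := List.range_eq_range'
    rw [h0, hr]
    exact left_scan_spec tb1 w0 0 Lm (by omega) (by omega)
      (fun j _ hjm => hLb j hjm) (Or.inr hLs)
  -- right scan appends nothing
  have hright : pvRightScan tb1 (w0 - 1) (List.range Lm) ((List.range ((w0 - 1) + 1)).reverse)
      = List.range Lm := by
    have hinit : List.range Lm = List.range Lm ++ (List.range' ((w0 - 1) + 1) (w0 - 1 - (w0 - 1))).reverse := by
      simp
    conv_lhs => rw [hinit]
    have := right_scan_spec tb1 w0 Lm w0 hw1 (by omega) (by omega) (by omega)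
      (fun j hbj hjw => by omega)
      (by rw [show w0 - 1 = w0 - 1 by rfl]; exact hstop)
      (w0 - 1) (by omega) (by omega)
    rw [this]
    simp
  rw [hleft, hright]
  have hsorted : PySem.List.sorted (List.range Lm) (fun x => x) false = List.range Lm := by
    apply PySem.List.sorted_eq_of_perm_of_pairwise_lt
    · exact List.Perm.refl _
    · exact List.pairwise_lt_range
  rw [hsorted, foldl_map_pop]
  apply List.map_congr_left
  intro row hrow
  have hrl : w0 ≤ row.length := hge row hrow
  rw [pop_desc_prefix Lm row (by omega)]
  have hcast : ((row.length : Int) - (Tm : Nat)) = ((row.length : Nat) : Int) := by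
    rw [hTm0]; simp
  rw [hcast, PySem.List.slice_natCast]
  rw [List.take_of_length_le (by simp)]

-- ===== VERDICT (by name: the statement is the Claim_ definition above) =====
theorem trimTextBlock_spec : Claim_equal_trimTextBlock := by
  intro tb _ hpre
  unfold Spec_trimTextBlock
  simp only [trimTextBlock, trimTextBlock_alt]
  rw [rows_eq tb, foldB_fst tb [] none, foldB_snd_none tb []]
  have hfilter_eq : tb.filter (fun r => !decide (pvLead r = r.length)) = tb.filter (fun r => !pvBlankRow r) := by
    apply List.filter_congr
    intro r _
    rw [blank_eq_lead]
  have hkept_eq : tb.filter (fun r => r.any (fun c => c.isSome)) = tb.filter (fun r => !pvBlankRow r) := by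
    apply List.filter_congr
    intro r _
    rw [any_isSome_eq_not_blank]
  rw [hfilter_eq]
  unfold Pre_trimTextBlock at hpre
  rw [hkept_eq] at hpre
  set tb1 := tb.filter (fun r => !pvBlankRow r) with htb1
  by_cases htb : tb1 = []
  · rw [if_pos htb, htb]
  · rw [if_neg htb]
    obtain ⟨r0, rs, hcons⟩ := List.exists_cons_of_ne_nil htb
    rw [hcons]
    dsimp only
    rw [minPair_fold rs (pvLead r0) (pvLead r0.reverse)]
    rw [hcons] at hpre
    have hnb : ∀ r ∈ r0 :: rs, pvBlankRow r = false := by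
      intro r hr
      rw [← hcons] at hr
      have := List.of_mem_filter hr
      simpa using this
    rcases hpre with h1 | ⟨hge, hlast, hwcol⟩
    · exact nonempty_case r0 rs ((r0 :: rs).headD []).length h1 hnb
    · exact nonempty_ragged r0 rs hnb hge hlast hwcol
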